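-- pv_equiv track=rewrite | github.com/bvschaik/advent-of-code | 2019/day16.py | transform_digit
-- ===== SOURCE A (Python) =====
-- def transform_digit(input, index): # index: 1..len(input)
--     max_index = len(input)
--     result = 0
--     step = index * 4
--     for start in range(index - 1, max_index, step):
--         # Add ones
--         for x in range(start, min(start + index, max_index)):
--             result += input[x]
--         # Subtract minus ones
--         nstart = start + index * 2
--         for x in range(nstart, min(nstart + index, max_index)):
--             result -= input[x]
--
--     return abs(result) % 10
-- ===== SOURCE B (Python) =====
-- def transform_digit(input, index):
--     n = len(input)
--     prefix = [0] * (n + 1)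
--     for i, v in enumerate(input):
--         prefix[i + 1] = prefix[i] + v
--     total = 0
--     for start in range(index - 1, n, index * 4):
--         total += prefix[min(start + index, n)] - prefix[start]
--         mid = min(start + 2 * index, n)
--         total -= prefix[min(mid + index, n)] - prefix[mid]
--     return abs(total) % 10
-- ===== Notes on version B (the rewrite author's own statement) =====
-- stated objective: alternative
-- what changed: Replaces the nested element-by-element block loops with a single prefix-sum pass, each +1/-1 block sum then obtained by one subtraction of two prefix values.
import Mathlib
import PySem

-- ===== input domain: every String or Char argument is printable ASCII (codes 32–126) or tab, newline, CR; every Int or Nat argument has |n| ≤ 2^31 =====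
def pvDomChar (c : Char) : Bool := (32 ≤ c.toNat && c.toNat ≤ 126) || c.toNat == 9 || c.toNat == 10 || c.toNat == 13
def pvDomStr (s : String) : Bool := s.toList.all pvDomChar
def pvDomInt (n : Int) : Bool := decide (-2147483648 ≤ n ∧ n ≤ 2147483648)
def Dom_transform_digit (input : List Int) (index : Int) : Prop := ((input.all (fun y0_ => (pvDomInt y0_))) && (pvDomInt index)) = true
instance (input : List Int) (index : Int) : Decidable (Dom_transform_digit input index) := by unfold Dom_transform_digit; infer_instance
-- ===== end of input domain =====

-- B computes each ±1 block sum of the FFT phase by subtracting two prefix sums built in one pass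
-- (alternative algorithm, same asymptotic cost); A and B agree for every index ≠ 0 (index = 0 raises ValueError in both).


-- ===== PORT A =====
def transform_digit (input : List Int) (index : Int) : Int :=
  let max_index : Int := input.length
  let result : Int := 0
  let step : Int := index * 4
  let result :=
    (PySem.List.pyRange (index - 1) max_index step).foldl (fun result start =>
      let result :=
        (PySem.List.pyRange start (min (start + index) max_index) 1).foldl
          (fun r x => r + PySem.List.pyGetD input x 0) result
      let nstart := start + index * 2
      (PySem.List.pyRange nstart (min (nstart + index) max_index) 1).foldl
        (fun r x => r - PySem.List.pyGetD input x 0) result) result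
  PySem.Int.mod |result| 10

-- ===== PORT B =====
-- one-pass prefix-sum build (Source B's first loop)
def pvPrefix : Int → List Int → List Int
  | acc, [] => [acc]
  | acc, v :: vs => acc :: pvPrefix (acc + v) vs

def transform_digit_alt (input : List Int) (index : Int) : Int :=
  let n : Int := input.length
  let pref := pvPrefix 0 input
  let total :=
    (PySem.List.pyRange (index - 1) n (index * 4)).foldl (fun t start =>
      let t := t + (PySem.List.pyGetD pref (min (start + index) n) 0
                    - PySem.List.pyGetD pref start 0)
      let mid := min (start + 2 * index) n
      t - (PySem.List.pyGetD pref (min (mid + index) n) 0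
           - PySem.List.pyGetD pref mid 0)) 0
  PySem.Int.mod |total| 10

-- ===== PRECONDITION & SPEC =====
-- Pre_ excludes exactly index = 0, where both Pythons raise ValueError (range step 0).
def Pre_transform_digit (input : List Int) (index : Int) : Prop := index ≠ 0
instance (input : List Int) (index : Int) : Decidable (Pre_transform_digit input index) := by unfold Pre_transform_digit; infer_instance
def pvWitness_transform_digit : List Int × Int := ([1, 2, 3, 4, 5], 2)
def Spec_transform_digit (input : List Int) (index : Int) (out : Int) : Prop := out = transform_digit_alt input index
instance (input : List Int) (index : Int) (out : Int) : Decidable (Spec_transform_digit input index out) := by unfold Spec_transform_digit; infer_instance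

-- ===== CLAIM (what is proved, stated in full; the proofs are below) =====
def Claim_equal_transform_digit : Prop := ∀ (input : List Int) (index : Int), Dom_transform_digit input index → Pre_transform_digit input index → Spec_transform_digit input index (transform_digit input index)

-- ===== LEMMAS AND PROOFS =====

-- reading the prefix list: entry k is the sum of the first k elements
theorem pvPrefix_get (input : List Int) (acc : Int) (k : Int)
    (h0 : 0 ≤ k) (hk : k ≤ input.length) :
    PySem.List.pyGetD (pvPrefix acc input) k 0 = acc + (input.take k.toNat).sum := by
  induction input generalizing acc k with
  | nil =>
    have hk0 : k = 0 := by simp at hk; omega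
    subst hk0
    simp [pvPrefix, PySem.List.pyGetD, PySem.List.pyGet?, PySem.List.pyIdx?]
  | cons v vs ih =>
    rcases eq_or_lt_of_le h0 with h | h
    · have hk0 : k = 0 := h.symm
      subst hk0
      rw [PySem.List.pyGetD_of_nonneg _ 0 (by omega)]
      simp [pvPrefix]
    · have hk' : k - 1 ≤ (vs.length : Int) := by simp at hk; omega
      have h0' : 0 ≤ k - 1 := by omega
      have := ih (acc + v) (k - 1) h0' hk'
      have hkn : k.toNat = (k - 1).toNat + 1 := by omega
      rw [hkn]
      simp only [List.take_succ_cons, List.sum_cons]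
      have hget : PySem.List.pyGetD (pvPrefix acc (v :: vs)) k 0
          = PySem.List.pyGetD (pvPrefix (acc + v) vs) (k - 1) 0 := by
        rw [PySem.List.pyGetD_of_nonneg _ 0 (by omega),
            PySem.List.pyGetD_of_nonneg _ 0 (by omega)]
        have hkn' : k.toNat = (k - 1).toNat + 1 := by omega
        rw [hkn']
        rfl
      rw [hget, this]; ring

-- sum of input[a:b] via a foldl over range(a,b) equals the difference of prefix sums
theorem block_sum (input : List Int) (a b r : Int) (h0 : 0 ≤ a) (hab : a ≤ b)
    (hb : b ≤ input.length) :
    (PySem.List.pyRange a b 1).foldl (fun r x => r + PySem.List.pyGetD input x 0) r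
      = r + ((input.take b.toNat).sum - (input.take a.toNat).sum) := by
  have key : ∀ m : ℕ, a + m ≤ input.length →
      (PySem.List.pyRange a (a + m) 1).foldl (fun r x => r + PySem.List.pyGetD input x 0) r
        = r + ((input.take (a + (m : Int)).toNat).sum - (input.take a.toNat).sum) := by
    intro m
    induction m with
    | zero => intro _; simp [PySem.List.pyRange_one_eq_nil]
    | succ m ih =>
      intro hm
      have hm' : a + (m : Int) ≤ input.length := by push_cast at hm ⊢; omega
      have hsplit : PySem.List.pyRange a (a + ((m : Int) + 1)) 1
          = PySem.List.pyRange a (a + (m : Int)) 1 ++ [a + (m : Int)] := by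
        have := PySem.List.pyRange_one_succ_right (a := a) (b := a + (m : Int)) (by omega)
        simpa [add_assoc] using this
      have hidx : (a + (m : Int)).toNat < input.length := by omega
      have hgd : PySem.List.pyGetD input (a + (m : Int)) 0 = input[(a + (m : Int)).toNat] := by
        exact PySem.List.pyGetD_eq_getElem input 0 (by omega) (by exact_mod_cast (by omega : a + (m : Int) < (input.length : Int)))
      have htake : (input.take ((a + (m : Int)).toNat + 1)).sum
          = (input.take (a + (m : Int)).toNat).sum + input[(a + (m : Int)).toNat] := by
        rw [List.take_add_one, List.getElem?_eq_getElem hidx, Option.toList_some,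
          List.sum_append]
        simp
      push_cast
      rw [hsplit, List.foldl_append, ih hm']
      simp only [List.foldl_cons, List.foldl_nil, hgd]
      have : (a + ((m : Int) + 1)).toNat = (a + (m : Int)).toNat + 1 := by omega
      rw [this, htake]
      ring
  have hm : b = a + ((b - a).toNat : Int) := by omega
  have := key (b - a).toNat (by omega)
  rw [hm]
  exact this

-- same, subtracting
theorem block_sub (input : List Int) (a b r : Int) (h0 : 0 ≤ a) (hab : a ≤ b)
    (hb : b ≤ input.length) :
    (PySem.List.pyRange a b 1).foldl (fun r x => r - PySem.List.pyGetD input x 0) r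
      = r - ((input.take b.toNat).sum - (input.take a.toNat).sum) := by
  have neg : ∀ (l : List Int) (r : Int),
      l.foldl (fun r x => r - PySem.List.pyGetD input x 0) r
        = - (l.foldl (fun r x => r + PySem.List.pyGetD input x 0) (-r)) := by
    intro l
    induction l with
    | nil => intro r; simp
    | cons x xs ih => intro r; simp only [List.foldl_cons]; rw [ih]; ring_nf
  rw [neg, block_sum input a b (-r) h0 hab hb]; ring

theorem transform_digit_spec : Claim_equal_transform_digit := by
  intro input index _hdom hpre
  unfold Spec_transform_digit transform_digit transform_digit_alt
  simp only []
  congr 1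
  rcases lt_or_gt_of_ne hpre with hneg | hpos
  · -- index < 0: the outer range is empty in both programs
    have : PySem.List.pyRange (index - 1) (input.length : Int) (index * 4) = [] := by
      simp only [PySem.List.pyRange]
      split_ifs <;> first | rfl | (exfalso; omega)
    rw [this]; simp
  · -- index ≥ 1: rewrite each iteration body via the prefix sums
    set n : Int := (input.length : Int) with hn
    have h4 : (0:Int) < index * 4 := by omega
    congr 1
    apply PySem.List.foldl_congr_mem
    intro acc start hmem
    have hstart := (PySem.List.mem_pyRange_iff_of_pos h4 start).1 hmem
    have h0s : 0 ≤ start := by omega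
    have hsn : start < n := hstart.2.1
    -- the add block
    have hadd := block_sum input start (min (start + index) n) acc h0s
      (by omega) (by simp [hn])
    -- prefix lookups
    have hP : ∀ k : Int, 0 ≤ k → k ≤ n →
        PySem.List.pyGetD (pvPrefix 0 input) k 0 = (input.take k.toNat).sum := by
      intro k hk0 hkn
      rw [pvPrefix_get input 0 k hk0 (by simpa [hn] using hkn)]; ring
    rw [hadd]
    rw [hP (min (start + index) n) (by omega) (by omega),
        hP start h0s (by omega),
        hP (min (start + 2 * index) n) (by omega) (by omega),
        hP (min (min (start + 2 * index) n + index) n) (by omega) (by omega)]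
    -- the subtract block
    by_cases hmid : start + index * 2 ≤ n
    · have hmideq : min (start + 2 * index) n = start + index * 2 := by omega
      have hsub := block_sub input (start + index * 2) (min (start + index * 2 + index) n)
        (acc + ((input.take (min (start + index) n).toNat).sum - (input.take start.toNat).sum))
        (by omega) (by omega) (by simp [hn])
      rw [hsub, hmideq]
    · -- subtract range empty, prefix difference zero
      have hempty : PySem.List.pyRange (start + index * 2) (min (start + index * 2 + index) n) 1 = [] := by
        apply PySem.List.pyRange_one_eq_nil; omega
      rw [hempty]
      have h1 : min (start + 2 * index) n = n := by omega
      rw [h1]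
      have h2 : min (n + index) n = n := by omega
      rw [h2]
      simp
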